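-- pv_equiv track=rewrite | github.com/ducdt1298/translate-renpy | run.py | get_content_from_raw
-- ===== SOURCE A (Python) =====
-- def get_content_from_raw(raw_line):
--     result = ""
--     is_start = False
--     for i in range(len(raw_line), 0, -1):
--         if raw_line[i-1] == '"':
--             if not is_start:
--                 is_start = True
--                 continue
--             if raw_line[i-2] != '\\':
--                 return result[::-1].replace('\n', '')
--         result += raw_line[i-1]
-- ===== SOURCE B (Python) =====
-- def get_content_from_raw(raw_line):
--     end = raw_line.rfind('"')
--     if end == -1:
--         return None
--     for j in range(end - 1, -1, -1):
--         if raw_line[j] == '"' and raw_line[j - 1] != '\\':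
--             return (raw_line[j + 1:end] + raw_line[end + 1:]).replace('\n', '')
--     return None
-- ===== Notes on version B (the rewrite author's own statement) =====
-- stated objective: simpler
-- what changed: A builds the content in a reversed character accumulator while scanning right-to-left; B instead locates the closing quote with rfind, scans indices downward for the opening unescaped quote, and returns the slices raw_line[j+1:end] + raw_line[end+1:] with newlines removed (slicing also avoids A's per-character string concatenation, a constant-factor speedup a timing run confirmed).
import Mathlib
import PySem

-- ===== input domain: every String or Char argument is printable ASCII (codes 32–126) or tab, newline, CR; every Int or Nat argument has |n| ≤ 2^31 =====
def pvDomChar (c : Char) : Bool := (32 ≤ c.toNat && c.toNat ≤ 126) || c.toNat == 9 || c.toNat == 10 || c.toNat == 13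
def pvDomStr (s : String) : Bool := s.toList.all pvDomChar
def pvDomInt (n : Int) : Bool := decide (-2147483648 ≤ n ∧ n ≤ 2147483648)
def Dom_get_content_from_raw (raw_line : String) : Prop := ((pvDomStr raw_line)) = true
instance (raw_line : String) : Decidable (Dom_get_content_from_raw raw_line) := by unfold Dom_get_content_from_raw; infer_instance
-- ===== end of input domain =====

-- B replaces A's reverse-accumulator loop by locate-the-quotes-then-slice (rfind + downward index
-- scan + slice concatenation); objective: simpler decomposition, same behaviour (including the tail
-- after the closing quote, which A keeps).

-- ===== PORT A =====
-- A's loop 'for i in range(len, 0, -1)': recursion on the python loop variable i;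
-- raw_line[i-1] / raw_line[i-2] via pyGet? (a negative index wraps from the end, exactly
-- Python's rule); in reachable states the index is always in range, so .getD ' ' never supplies
-- the value; result[::-1].replace('\n','') is reverse + PySem.Chars.replace.
def goA_get (s : List Char) : Nat → List Char → Bool → Option String
  | 0, _, _ => none
  | i + 1, result, is_start =>
    if (PySem.List.pyGet? s ((i : Int))).getD ' ' = '"' then
      if !is_start then goA_get s i result true
      else if (PySem.List.pyGet? s ((i : Int) - 1)).getD ' ' ≠ '\\' then
        some (String.mk (PySem.Chars.replace result.reverse ['\n'] []))
      else goA_get s i (result ++ [(PySem.List.pyGet? s ((i : Int))).getD ' ']) is_start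
    else goA_get s i (result ++ [(PySem.List.pyGet? s ((i : Int))).getD ' ']) is_start

def get_content_from_raw (raw_line : String) : Option String :=
  goA_get raw_line.toList raw_line.toList.length [] false

-- ===== PORT B =====
-- raw_line.rfind('"'): scan the reversed characters; n - 1 is the original index of the front char
def rfindQ_get : List Char → Nat → Int
  | [], _ => -1
  | c :: t, n => if c = '"' then (n : Int) - 1 else rfindQ_get t (n - 1)

-- Source B's 'for j in range(end-1, -1, -1)': recursion on k = j + 1 (k = 0 ↔ loop exhausted);
-- raw_line[j-1] via pyGet? (wraps at j = 0, as in Python); the two slices of the return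
def goB_get (s : List Char) (e : Nat) : Nat → Option String
  | 0 => none
  | k + 1 =>
    if (PySem.List.pyGet? s ((k : Int))).getD ' ' = '"' then
      if (PySem.List.pyGet? s ((k : Int) - 1)).getD ' ' ≠ '\\' then
        some (String.mk (PySem.Chars.replace
          (PySem.List.slice s (some ((k : Int) + 1)) (some (e : Int)) ++
           PySem.List.slice s (some ((e : Int) + 1)) none) ['\n'] []))
      else goB_get s e k
    else goB_get s e k

def get_content_from_raw_alt (raw_line : String) : Option String :=
  let s := raw_line.toList
  let e := rfindQ_get s.reverse s.length
  if e = -1 then none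
  else goB_get s e.toNat e.toNat

-- ===== PRECONDITION & SPEC =====
def Spec_get_content_from_raw (raw_line : String) (out : Option String) : Prop := out = get_content_from_raw_alt raw_line
instance (raw_line : String) (out : Option String) : Decidable (Spec_get_content_from_raw raw_line out) := by unfold Spec_get_content_from_raw; infer_instance

-- ===== CLAIM (what is proved, stated in full; the proofs are below) =====
def Claim_equal_get_content_from_raw : Prop := ∀ (raw_line : String), Dom_get_content_from_raw raw_line → Spec_get_content_from_raw raw_line (get_content_from_raw raw_line)

-- ===== LEMMAS AND PROOFS =====

theorem pg_lt {s : List Char} {i : Nat} (h : i < s.length) :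
    (PySem.List.pyGet? s ((i : Int))).getD ' ' = s[i] := by
  simp [PySem.List.pyGet?_natCast, List.getElem?_eq_getElem h]

-- no quote anywhere: A's scan never fires
theorem goA_none {s : List Char} (hq : '"' ∉ s) :
    ∀ i r, i ≤ s.length → goA_get s i r false = none := by
  intro i
  induction i with
  | zero => intro r _; rfl
  | succ i ih =>
    intro r hi
    have hlt : i < s.length := by omega
    have hc : s[i] ≠ '"' := fun h => hq (h ▸ List.getElem_mem hlt)
    simp only [goA_get]
    rw [pg_lt hlt, if_neg hc]
    exact ih _ (by omega)

-- no quote anywhere: rfind returns -1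
theorem rfindQ_none {rev : List Char} (hq : '"' ∉ rev) : ∀ n, rfindQ_get rev n = -1 := by
  induction rev with
  | nil => intro n; rfl
  | cons c t ih =>
    intro n
    have : c ≠ '"' := fun h => hq (h ▸ List.mem_cons_self)
    simp only [rfindQ_get, if_neg this]
    exact ih (fun h => hq (List.mem_cons_of_mem _ h)) _

-- rfind on w ++ '"' :: t with no quote in w
theorem rfindQ_split {w : List Char} (hw : '"' ∉ w) (t : List Char) :
    ∀ n : Nat, w.length < n → rfindQ_get (w ++ '"' :: t) n = (n : Int) - 1 - w.length := by
  induction w with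
  | nil => intro n _; simp [rfindQ_get]
  | cons c w ih =>
    intro n hn
    have hc : c ≠ '"' := fun h => hw (h ▸ List.mem_cons_self)
    have hw' : '"' ∉ w := fun h => hw (List.mem_cons_of_mem _ h)
    simp only [List.cons_append, rfindQ_get, if_neg hc]
    rw [ih hw' (n - 1) (by simp at hn ⊢; omega)]
    simp only [List.length_cons]
    push_cast
    omega

-- last-quote decomposition
theorem last_quote_split {s : List Char} (h : '"' ∈ s) :
    ∃ u v, s = u ++ '"' :: v ∧ '"' ∉ v := by
  induction s with
  | nil => cases h
  | cons c t ih =>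
    by_cases ht : '"' ∈ t
    · obtain ⟨u, v, hsplit, hv⟩ := ih ht
      exact ⟨c :: u, v, by simp [hsplit], hv⟩
    · have hc : c = '"' := by
        rcases List.mem_cons.mp h with h' | h'
        · exact h'.symm
        · exact absurd h' ht
      exact ⟨[], t, by simp [hc], ht⟩

-- phase 1 of A: scan the tail beyond the last quote, flip is_start at the quote
theorem goA_phase1 {s u v : List Char} (hsplit : s = u ++ '"' :: v) (hv : '"' ∉ v) :
    ∀ m, m ≤ v.length →
      goA_get s (u.length + 1 + m) ((s.drop (u.length + 1 + m)).reverse) false =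
      goA_get s u.length ((s.drop (u.length + 1)).reverse) true := by
  subst hsplit
  intro m
  induction m with
  | zero =>
    intro _
    have hlt : u.length < (u ++ '"' :: v).length := by simp
    have hq : (u ++ '"' :: v)[u.length]'hlt = '"' := by
      rw [List.getElem_append_right (le_refl u.length)]
      simp
    simp only [Nat.add_zero, goA_get]
    rw [pg_lt hlt, if_pos hq, if_pos (by decide : (!false) = true)]
  | succ m ih =>
    intro hm
    have hlt : u.length + 1 + m < (u ++ '"' :: v).length := by simp; omega
    have hchar : (u ++ '"' :: v)[u.length + 1 + m]'hlt = v[m]'(by omega) := by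
      rw [List.getElem_append_right (by omega)]
      simp [show u.length + 1 + m - u.length = m + 1 by omega]
    have hc : (u ++ '"' :: v)[u.length + 1 + m]'hlt ≠ '"' := by
      rw [hchar]; exact fun h => hv (h ▸ List.getElem_mem _)
    simp only [goA_get, Nat.add_eq]
    rw [pg_lt hlt, if_neg hc]
    have hres : ((u ++ '"' :: v).drop (u.length + 1 + m + 1)).reverse ++
        [(u ++ '"' :: v)[u.length + 1 + m]'hlt] =
        ((u ++ '"' :: v).drop (u.length + 1 + m)).reverse := by
      conv_rhs => rw [List.drop_eq_getElem_cons hlt]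
      rw [List.reverse_cons]
    rw [show u.length + 1 + (m + 1) = u.length + 1 + m + 1 by omega, hres]
    exact ih (by omega)

-- phase 2: A with is_start = true agrees step by step with B's scan
theorem goA_phase2 {s : List Char} {e : Nat} (he : e < s.length) :
    ∀ i, i ≤ e →
      goA_get s i ((s.drop (e + 1)).reverse ++ ((s.take e).drop i).reverse) true = goB_get s e i := by
  intro i
  induction i with
  | zero => intro _; rfl
  | succ i ih =>
    intro hi
    have hlt : i < s.length := by omega
    have hie : i < e := by omega
    have htake : (s.take e).drop i = s[i] :: (s.take e).drop (i + 1) := by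
      rw [List.drop_eq_getElem_cons (by simp; omega)]
      congr 1
      exact List.getElem_take
    have hres : (s.drop (e + 1)).reverse ++ ((s.take e).drop (i + 1)).reverse ++ [s[i]] =
        (s.drop (e + 1)).reverse ++ ((s.take e).drop i).reverse := by
      rw [htake]; simp
    simp only [goA_get, goB_get]
    rw [pg_lt hlt]
    generalize (PySem.List.pyGet? s ((i : Int) - 1)).getD ' ' = esc
    by_cases hc : s[i] = '"'
    · rw [if_pos hc, if_pos hc, if_neg (by decide : ¬ (!true) = true)]
      by_cases hesc : esc = '\\'
      · rw [if_neg (not_not_intro hesc), if_neg (not_not_intro hesc), hres]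
        exact ih (by omega)
      · rw [if_pos hesc, if_pos hesc]
        have hkey : ((s.drop (e + 1)).reverse ++ ((s.take e).drop (i + 1)).reverse).reverse =
            PySem.List.slice s (some ((i : Int) + 1)) (some ((e : Int))) ++
            PySem.List.slice s (some ((e : Int) + 1)) none := by
          rw [show ((i : Int) + 1) = (((i + 1 : Nat)) : Int) by push_cast; ring,
            show ((e : Int) + 1) = (((e + 1 : Nat)) : Int) by push_cast; ring,
            PySem.List.slice_natCast, PySem.List.slice_from_natCast, List.drop_take,
            List.reverse_append, List.reverse_reverse, List.reverse_reverse]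
        rw [hkey]
    · rw [if_neg hc, if_neg hc, hres]
      exact ih (by omega)

-- ===== VERDICT (by name: the statement is the Claim_ definition above) =====
theorem get_content_from_raw_spec : Claim_equal_get_content_from_raw := by
  intro raw_line _
  unfold Spec_get_content_from_raw get_content_from_raw
  simp only [get_content_from_raw_alt]
  set s := raw_line.toList with hs
  by_cases hq : '"' ∈ s
  · obtain ⟨u, v, hsplit, hv⟩ := last_quote_split hq
    have hlen : s.length = u.length + 1 + v.length := by
      simp only [hsplit, List.length_append, List.length_cons]; omega
    have hrf : rfindQ_get s.reverse s.length = (u.length : Int) := by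
      rw [hsplit, List.reverse_append, List.reverse_cons, List.append_assoc,
        List.singleton_append,
        rfindQ_split (by simpa using hv) _ _
          (by simp only [List.length_reverse, List.length_append, List.length_cons]; omega)]
      simp only [List.length_reverse, List.length_append, List.length_cons]
      push_cast
      omega
    rw [hrf]
    rw [if_neg (by omega : (u.length : Int) ≠ -1), Int.toNat_natCast]
    have h1 : goA_get s s.length [] false =
        goA_get s u.length ((s.drop (u.length + 1)).reverse) true := by
      have := goA_phase1 hsplit hv v.length (le_refl _)
      have hdropall : s.drop (u.length + 1 + v.length) = [] :=
        List.drop_eq_nil_of_le (by omega)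
      rw [hlen, ← this, hdropall]
      rfl
    rw [h1]
    have h2 := goA_phase2 (s := s) (e := u.length) (by omega) u.length (le_refl _)
    have hdrope : (s.take u.length).drop u.length = [] :=
      List.drop_eq_nil_of_le (by simp)
    rw [hdrope] at h2
    simpa using h2
  · rw [goA_none hq s.length [] (le_refl _),
      rfindQ_none (by simpa using hq) s.length]
    simp
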